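-- pv_equiv track=rewrite | github.com/nvenegas-oliva/training | hacker-rank/piling-up.py | piling_up
-- ===== SOURCE A (Python) =====
-- def piling_up(side_lenghts):
--     # side_lenghts = [1, 2, 3, 4, 5, 6]
--     # side_lenghts = [4, 3, 2, 1, 3, 4]
--     last_pop = 999999999999
--     while side_lenghts:
--         if max(side_lenghts[0], side_lenghts[-1]) <= last_pop:
--             if side_lenghts[0] >= side_lenghts[-1]:
--                 last_pop = side_lenghts.pop(0)
--             else:
--                 last_pop = side_lenghts.pop(-1)
--         else:
--             return "No"
--     return "Yes"
-- ===== SOURCE B (Python) =====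
-- def piling_up(side_lenghts):
--     # Two-pointer scan over indices (no pop(0)); does not mutate the input.
--     i = 0
--     j = len(side_lenghts) - 1
--     last = 999999999999
--     while i <= j:
--         if side_lenghts[i] >= side_lenghts[j]:
--             if side_lenghts[i] > last:
--                 return "No"
--             last = side_lenghts[i]
--             i += 1
--         else:
--             if side_lenghts[j] > last:
--                 return "No"
--             last = side_lenghts[j]
--             j -= 1
--     return "Yes"
-- ===== Notes on version B (the rewrite author's own statement) =====
-- stated objective: faster
-- what changed: Replaces the destructive loop that pops from the front/back of the list (pop(0) shifts the whole list each step) by a two-pointer index scan that never mutates the list.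
import Mathlib
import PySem

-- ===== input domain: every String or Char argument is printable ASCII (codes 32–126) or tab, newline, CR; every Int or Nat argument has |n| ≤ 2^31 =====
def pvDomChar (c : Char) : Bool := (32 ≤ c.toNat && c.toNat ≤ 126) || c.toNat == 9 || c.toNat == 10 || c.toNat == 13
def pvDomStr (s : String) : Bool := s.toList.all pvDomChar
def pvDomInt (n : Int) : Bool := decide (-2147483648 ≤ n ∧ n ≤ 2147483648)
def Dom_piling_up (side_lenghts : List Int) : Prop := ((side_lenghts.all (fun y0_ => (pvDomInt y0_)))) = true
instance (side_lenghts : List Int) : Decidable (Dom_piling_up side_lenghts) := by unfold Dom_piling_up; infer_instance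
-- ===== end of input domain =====

-- B replaces A's destructive pop(0)/pop(-1) loop by a two-pointer index scan (faster; A mutates
-- its argument in place — the equivalence proved here is about the return value only).


-- ===== PORT A =====
-- the while loop: pops the larger of the two ends while it is ≤ the last popped value
def piling_up_go : List Int → Int → String
  | [], _ => "Yes"
  | x :: xs, last_pop =>
    let lastEl := (x :: xs).getLast (List.cons_ne_nil x xs)
    if max x lastEl ≤ last_pop then
      if x ≥ lastEl then piling_up_go xs x
      else piling_up_go ((x :: xs).dropLast) lastEl
    else "No"
termination_by l => l.length
decreasing_by all_goals simp [List.length_dropLast]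

def piling_up (side_lenghts : List Int) : String :=
  piling_up_go side_lenghts 999999999999

-- ===== PORT B =====
-- the while loop over indices i ≤ j (both indices always in range, so the getD default is never used)
def piling_up_alt_go (l : List Int) (i j last : Int) : String :=
  if _h : i ≤ j then
    let a := PySem.List.pyGetD l i 0
    let b := PySem.List.pyGetD l j 0
    if a ≥ b then
      (if a > last then "No" else piling_up_alt_go l (i + 1) j a)
    else
      (if b > last then "No" else piling_up_alt_go l i (j - 1) b)
  else "Yes"
termination_by (j + 1 - i).toNat
decreasing_by all_goals omega

def piling_up_alt (side_lenghts : List Int) : String :=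
  piling_up_alt_go side_lenghts 0 ((side_lenghts.length : Int) - 1) 999999999999

-- ===== PRECONDITION & SPEC =====
def Spec_piling_up (side_lenghts : List Int) (out : String) : Prop := out = piling_up_alt side_lenghts
instance (side_lenghts : List Int) (out : String) : Decidable (Spec_piling_up side_lenghts out) := by unfold Spec_piling_up; infer_instance

-- ===== CLAIM (what is proved, stated in full; the proofs are below) =====
def Claim_equal_piling_up : Prop := ∀ (side_lenghts : List Int), Dom_piling_up side_lenghts → Spec_piling_up side_lenghts (piling_up side_lenghts)

-- ===== LEMMAS AND PROOFS =====

-- the segment l[i..j] (inclusive) that B's pointers still cover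
def pvSeg (l : List Int) (i j : Int) : List Int :=
  (l.drop i.toNat).take ((j + 1 - i).toNat)

lemma pvSeg_empty (l : List Int) (i j : Int) (h : j < i) : pvSeg l i j = [] := by
  unfold pvSeg
  have : (j + 1 - i).toNat = 0 := by omega
  simp [this]

lemma pvSeg_length (l : List Int) (i j : Int) (h0 : 0 ≤ i) (hj : j < (l.length : Int))
    (hij : i ≤ j) : (pvSeg l i j).length = (j + 1 - i).toNat := by
  unfold pvSeg
  simp [List.length_take, List.length_drop]
  omega

lemma pvSeg_cons (l : List Int) (i j : Int) (h0 : 0 ≤ i) (hj : j < (l.length : Int))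
    (hij : i ≤ j) :
    pvSeg l i j = l[i.toNat]'(by omega) :: pvSeg l (i + 1) j := by
  unfold pvSeg
  have hlt : i.toNat < l.length := by omega
  have hd : l.drop i.toNat = l[i.toNat] :: l.drop (i.toNat + 1) := by
    rw [List.drop_eq_getElem_cons hlt]
  have h1 : (j + 1 - i).toNat = (j + 1 - (i + 1)).toNat + 1 := by omega
  have h2 : (i + 1).toNat = i.toNat + 1 := by omega
  rw [hd, h1, h2, List.take_succ_cons]

lemma pvSeg_getElem (l : List Int) (i j : Int) (h0 : 0 ≤ i) (hj : j < (l.length : Int))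
    (hij : i ≤ j) (k : Nat) (hk : k < (j + 1 - i).toNat) :
    (pvSeg l i j)[k]'(by rw [pvSeg_length l i j h0 hj hij]; omega) = l[i.toNat + k]'(by omega) := by
  unfold pvSeg
  simp [List.getElem_take, List.getElem_drop]

lemma pvSeg_getLast (l : List Int) (i j : Int) (h0 : 0 ≤ i) (hj : j < (l.length : Int))
    (hij : i ≤ j) (hne : pvSeg l i j ≠ []) :
    (pvSeg l i j).getLast hne = l[j.toNat]'(by omega) := by
  have hlen := pvSeg_length l i j h0 hj hij
  rw [List.getLast_eq_getElem]
  have hk : (pvSeg l i j).length - 1 = (j + 1 - i).toNat - 1 := by omega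
  have hk2 : (j + 1 - i).toNat - 1 < (j + 1 - i).toNat := by omega
  have := pvSeg_getElem l i j h0 hj hij ((j + 1 - i).toNat - 1) hk2
  simp only [hk]
  rw [this]
  congr 1
  omega

lemma pvSeg_dropLast (l : List Int) (i j : Int) (h0 : 0 ≤ i) (hj : j < (l.length : Int))
    (hij : i ≤ j) : (pvSeg l i j).dropLast = pvSeg l i (j - 1) := by
  have hlen := pvSeg_length l i j h0 hj hij
  rw [List.dropLast_eq_take, hlen]
  unfold pvSeg
  rw [List.take_take]
  congr 1
  omega

-- main invariant: B's loop on (i, j) computes A's loop on the segment l[i..j]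
lemma go_eq (l : List Int) : ∀ (n : Nat) (i j last : Int), (j + 1 - i).toNat = n →
    0 ≤ i → j < (l.length : Int) →
    piling_up_alt_go l i j last = piling_up_go (pvSeg l i j) last := by
  intro n
  induction n using Nat.strong_induction_on with
  | _ n ih =>
    intro i j last hn h0 hj
    by_cases hij : i ≤ j
    · have hcons := pvSeg_cons l i j h0 hj hij
      have hne : pvSeg l i j ≠ [] := by rw [hcons]; simp
      have hlast := pvSeg_getLast l i j h0 hj hij hne
      rw [piling_up_alt_go]
      rw [dif_pos hij]
      have ha : PySem.List.pyGetD l i 0 = l[i.toNat]'(by omega) :=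
        PySem.List.pyGetD_eq_getElem l 0 h0 (by omega)
      have hb : PySem.List.pyGetD l j 0 = l[j.toNat]'(by omega) :=
        PySem.List.pyGetD_eq_getElem l 0 (by omega) (by omega)
      -- unfold A's loop one step on the cons form of the segment
      conv_rhs => rw [hcons, piling_up_go]
      simp only [← hcons, hlast]
      rw [ha, hb]
      set a := l[i.toNat]'(by omega) with hadef
      set b := l[j.toNat]'(by omega) with hbdef
      by_cases hab : a ≥ b
      · have hmax : max a b = a := max_eq_left hab
        rw [if_pos hab, hmax]
        by_cases hlt : a > last
        · rw [if_pos hlt, if_neg (by omega)]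
        · rw [if_neg hlt, if_pos (by omega), if_pos hab]
          have hseg : pvSeg l (i + 1) j = (pvSeg l i j).tail := by rw [hcons]; simp
          rw [ih ((j + 1 - (i + 1)).toNat) (by omega) (i + 1) j a rfl (by omega) hj, hseg,
            hcons]
      · have hmax : max a b = b := max_eq_right (by omega)
        rw [if_neg hab, hmax]
        by_cases hlt : b > last
        · rw [if_pos hlt, if_neg (by omega)]
        · rw [if_neg hlt, if_pos (by omega), if_neg hab]
          rw [ih ((j - 1 + 1 - i).toNat) (by omega) i (j - 1) b rfl h0 (by omega),
            ← pvSeg_dropLast l i j h0 hj hij]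
    · rw [piling_up_alt_go, dif_neg hij, pvSeg_empty l i j (by omega), piling_up_go]

-- ===== VERDICT (by name: the statement is the Claim_ definition above) =====
theorem piling_up_spec : Claim_equal_piling_up := by
  intro l _
  unfold Spec_piling_up piling_up piling_up_alt
  rw [go_eq l ((l.length : Int) - 1 + 1 - 0).toNat 0 ((l.length : Int) - 1) 999999999999 rfl
    (by omega) (by omega)]
  congr 1
  unfold pvSeg
  simp
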